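-- pv_equiv track=rewrite | github.com/yeganghwang/omok | iot_6789_student.py | extract_segments
-- ===== SOURCE A (Python) =====
-- def extract_segments(line, color):
--     segments = []
--     current_seg = []
--     line_length = len(line)
--
--     for i, val in enumerate(line):
--         if val == color:
--             current_seg.append(i)
--         else:
--             if current_seg:
--                 left_open = (current_seg[0] > 0 and line[current_seg[0] - 1] == 0)
--                 right_open = (current_seg[-1] < line_length - 1 and line[current_seg[-1] + 1] == 0)
--                 segments.append((current_seg, left_open, right_open))
--                 current_seg = []
--     if current_seg:
--         left_open = (current_seg[0] > 0 and line[current_seg[0] - 1] == 0)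
--         right_open = (current_seg[-1] < line_length - 1 and line[current_seg[-1] + 1] == 0)
--         segments.append((current_seg, left_open, right_open))
--     return segments
-- ===== SOURCE B (Python) =====
-- def extract_segments(line, color):
--     n = len(line)
--     segments = []
--     i = 0
--     while i < n:
--         if line[i] != color:
--             i += 1
--             continue
--         j = i
--         while j + 1 < n and line[j + 1] == color:
--             j += 1
--         segments.append((list(range(i, j + 1)),
--                          i > 0 and line[i - 1] == 0,
--                          j < n - 1 and line[j + 1] == 0))
--         i = j + 1
--     return segments
-- ===== Notes on version B (the rewrite author's own statement) =====
-- stated objective: alternative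
-- what changed: Replaces the accumulate-and-flush state machine (current_seg list grown element by element, flushed on non-color and at the end) by a skip-scan: an outer cursor jumps over non-color cells, an inner scan finds the end of each maximal run, and the segment's index list is produced at once with range(i, j+1).
import Mathlib
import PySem

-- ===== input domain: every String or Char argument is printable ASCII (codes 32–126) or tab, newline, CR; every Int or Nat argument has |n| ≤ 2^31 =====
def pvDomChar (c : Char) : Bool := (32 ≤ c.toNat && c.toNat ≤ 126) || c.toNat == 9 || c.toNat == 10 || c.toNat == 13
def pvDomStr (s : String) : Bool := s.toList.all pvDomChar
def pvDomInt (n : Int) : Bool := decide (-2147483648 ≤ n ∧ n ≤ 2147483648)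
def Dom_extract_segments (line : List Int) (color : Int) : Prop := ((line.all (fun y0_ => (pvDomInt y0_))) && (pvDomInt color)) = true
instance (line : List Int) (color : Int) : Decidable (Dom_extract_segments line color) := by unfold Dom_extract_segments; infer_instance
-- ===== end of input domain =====

-- A's accumulate-and-flush state machine vs B's skip-scan over maximal runs (alternative decomposition, same cost); proved to return equal values on all inputs.


-- ===== PORT A =====
-- flags for a flushed current_seg (guarded nonempty in Python; headD/getLastD defaults are never used there)
def segA (line : List Int) (cur : List Int) : List Int × Bool × Bool :=
  let first := cur.headD 0
  let last := cur.getLastD 0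
  (cur,
   decide (first > 0) && (PySem.List.pyGet? line (first - 1) == some 0),
   decide (last < (line.length : Int) - 1) && (PySem.List.pyGet? line (last + 1) == some 0))

def stepA (line : List Int) (color : Int)
    (st : List (List Int × Bool × Bool) × List Int) (iv : Int × Int) :
    List (List Int × Bool × Bool) × List Int :=
  if iv.2 = color then (st.1, st.2 ++ [iv.1])
  else if st.2 ≠ [] then (st.1 ++ [segA line st.2], []) else st

def finA (line : List Int) (st : List (List Int × Bool × Bool) × List Int) :
    List (List Int × Bool × Bool) :=
  if st.2 ≠ [] then st.1 ++ [segA line st.2] else st.1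

def extract_segments (line : List Int) (color : Int) : List (List Int × Bool × Bool) :=
  finA line ((PySem.List.enumerate line).foldl (stepA line color) ([], []))

-- ===== PORT B =====
-- inner while loop: length of the leading run of `color` in the remaining suffix
def runLen (color : Int) : List Int → Nat
  | [] => 0
  | v :: t => if v = color then runLen color t + 1 else 0

-- a segment whose run is i .. i+k, with list(range(i, j+1)) and the two flags
def mkSegB (line : List Int) (i : Int) (k : Nat) : List Int × Bool × Bool :=
  ((List.range (k + 1)).map (fun j => i + j),
   decide (i > 0) && (PySem.List.pyGet? line (i - 1) == some 0),
   decide (i + k < (line.length : Int) - 1) && (PySem.List.pyGet? line (i + k + 1) == some 0))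

-- outer while loop: cursor i over the suffix of line starting at index i
def goB (line : List Int) (color : Int) : Int → List Int → List (List Int × Bool × Bool)
  | _, [] => []
  | i, v :: t =>
    if v = color then
      let k := runLen color t
      mkSegB line i k :: goB line color (i + k + 1) (t.drop k)
    else goB line color (i + 1) t
termination_by i t => t.length
decreasing_by
  · simpa using Nat.lt_succ_of_le (List.length_drop (l := t) (i := k) ▸ Nat.sub_le _ _)
  · simp

def extract_segments_alt (line : List Int) (color : Int) : List (List Int × Bool × Bool) :=
  goB line color 0 line

-- ===== PRECONDITION & SPEC =====
def Spec_extract_segments (line : List Int) (color : Int) (out : List (List Int × Bool × Bool)) : Prop := out = extract_segments_alt line color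
instance (line : List Int) (color : Int) (out : List (List Int × Bool × Bool)) : Decidable (Spec_extract_segments line color out) := by unfold Spec_extract_segments; infer_instance

-- ===== CLAIM (what is proved, stated in full; the proofs are below) =====
def Claim_equal_extract_segments : Prop := ∀ (line : List Int) (color : Int), Dom_extract_segments line color → Spec_extract_segments line color (extract_segments line color)

-- ===== LEMMAS AND PROOFS =====

-- the current_seg after a run of k elements starting at index i
def irange (i : Int) (k : Nat) : List Int := (List.range k).map (fun j => i + j)

theorem irange_snoc (i : Int) (k : Nat) : irange i k ++ [i + k] = irange i (k + 1) := by
  simp [irange, List.range_succ]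

theorem segA_irange (line : List Int) (i : Int) (m : Nat) :
    segA line (irange i (m + 1)) = mkSegB line i m := by
  have hh : (irange i (m + 1)).headD 0 = i := by
    simp [irange, List.range_succ_eq_map]
  have hl : (irange i (m + 1)).getLastD 0 = i + m := by
    simp [irange, List.range_succ]
  simp only [segA, mkSegB]
  rw [hh, hl]
  simp [irange]

theorem runLen_drop (color : Int) (t : List Int) :
    t.drop (runLen color t) = [] ∨
      ∃ w rest, t.drop (runLen color t) = w :: rest ∧ w ≠ color := by
  induction t with
  | nil => left; rfl
  | cons v t ih =>
    by_cases hv : v = color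
    · simpa [runLen, hv] using ih
    · right; exact ⟨v, t, by simp [runLen, hv], hv⟩

-- after skipping a full run, the head of what remains (if any) is not color,
-- so goB just steps over it
theorem goB_after_run (line : List Int) (color : Int) (i : Int) (t : List Int) :
    goB line color i (t.drop (runLen color t)) =
      goB line color (i + 1) (t.drop (runLen color t + 1)) := by
  rcases runLen_drop color t with h | ⟨w, rest, h, hw⟩
  · have h1 : t.drop (runLen color t + 1) = [] := by
      rw [← List.tail_drop, h]
      rfl
    simp [h, h1, goB]
  · have h1 : t.drop (runLen color t + 1) = rest := by
      rw [← List.tail_drop, h]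
      rfl
    simp [h, h1, goB, hw]

theorem finA_nil (line : List Int) (segs : List (List Int × Bool × Bool)) :
    finA line (segs, []) = segs := by simp [finA]

theorem finA_irange (line : List Int) (s : Int) (m : Nat)
    (segs : List (List Int × Bool × Bool)) :
    finA line (segs, irange s (m + 1)) = segs ++ [mkSegB line s m] := by
  have hne : irange s (m + 1) ≠ [] := by
    have hlen : (irange s (m + 1)).length = m + 1 := by simp [irange]
    intro hcon
    rw [hcon] at hlen
    simp at hlen
  simp only [finA, ne_eq, hne, not_false_iff, if_true]
  rw [segA_irange]

-- main invariant: L1 (empty current_seg) and L2 (current_seg = run of m+1 elements ending just before the cursor j)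
theorem mainInv (line : List Int) (color : Int) :
    ∀ (n : Nat) (t : List Int), t.length ≤ n →
      (∀ (i : Int) (segs : List (List Int × Bool × Bool)),
        finA line ((PySem.List.enumerate t i).foldl (stepA line color) (segs, [])) =
          segs ++ goB line color i t) ∧
      (∀ (s j : Int) (m : Nat) (segs : List (List Int × Bool × Bool)), j = s + m + 1 →
        finA line ((PySem.List.enumerate t j).foldl (stepA line color) (segs, irange s (m + 1))) =
          segs ++ mkSegB line s (m + runLen color t) ::
            goB line color (j + runLen color t + 1) (t.drop (runLen color t + 1))) := by
  intro n
  induction n with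
  | zero =>
    intro t ht
    have h0 : t = [] := List.eq_nil_of_length_eq_zero (Nat.le_zero.mp ht)
    subst h0
    constructor
    · intro i segs
      simp [PySem.List.enumerate_nil, finA_nil, goB]
    · intro s j m segs hj
      rw [PySem.List.enumerate_nil, List.foldl_nil, finA_irange]
      have e1 : m + runLen color ([] : List Int) = m := by simp [runLen]
      rw [e1, show goB line color (j + ↑(runLen color ([] : List Int)) + 1)
            (List.drop (runLen color ([] : List Int) + 1) ([] : List Int)) = [] from by
          simp [runLen, goB]]
  | succ n ih =>
    intro t ht
    constructor
    · -- L1: current_seg empty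
      intro i segs
      cases t with
      | nil => simp [PySem.List.enumerate_nil, finA_nil, goB]
      | cons v t' =>
        have ht' : t'.length ≤ n := by simpa using ht
        rw [PySem.List.enumerate_cons, List.foldl_cons]
        by_cases hv : v = color
        · rw [show stepA line color (segs, []) (i, v) = (segs, irange i 1) from by
            simp [stepA, hv, irange]]
          rw [(ih t' ht').2 i (i + 1) 0 segs (by push_cast; ring)]
          rw [show goB line color i (v :: t') =
              mkSegB line i (runLen color t') ::
                goB line color (i + runLen color t' + 1) (t'.drop (runLen color t')) from by
            simp [goB, hv]]
          rw [goB_after_run]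
          simp only [Nat.zero_add]
          congr 2
          push_cast
          ring
        · rw [show stepA line color (segs, []) (i, v) = (segs, []) from by simp [stepA, hv]]
          rw [(ih t' ht').1 (i + 1) segs]
          rw [show goB line color i (v :: t') = goB line color (i + 1) t' from by
            simp [goB, hv]]
    · -- L2: current_seg = irange s (m+1), cursor at j = s + m + 1
      intro s j m segs hj
      cases t with
      | nil =>
        rw [PySem.List.enumerate_nil, List.foldl_nil, finA_irange]
        have e1 : m + runLen color ([] : List Int) = m := by simp [runLen]
        rw [e1, show goB line color (j + ↑(runLen color ([] : List Int)) + 1)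
              (List.drop (runLen color ([] : List Int) + 1) ([] : List Int)) = [] from by
            simp [runLen, goB]]
      | cons v t' =>
        have ht' : t'.length ≤ n := by simpa using ht
        rw [PySem.List.enumerate_cons, List.foldl_cons]
        by_cases hv : v = color
        · have hsnoc : irange s (m + 1) ++ [j] = irange s (m + 1 + 1) := by
            have hjc : j = s + ((m + 1 : Nat) : Int) := by push_cast; omega
            rw [hjc, irange_snoc]
          have estep : stepA line color (segs, irange s (m + 1)) (j, v) =
              (segs, irange s (m + 1 + 1)) := by
            simp [stepA, hv, hsnoc]
          rw [estep, (ih t' ht').2 s (j + 1) (m + 1) segs (by push_cast; omega)]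
          have hr : runLen color (v :: t') = runLen color t' + 1 := by simp [runLen, hv]
          rw [hr, List.drop_succ_cons]
          have e1 : m + (runLen color t' + 1) = m + 1 + runLen color t' := by omega
          have e2 : j + ((runLen color t' + 1 : Nat) : Int) + 1 =
              j + 1 + ((runLen color t' : Nat) : Int) + 1 := by push_cast; ring
          rw [e1, e2]
        · have estep : stepA line color (segs, irange s (m + 1)) (j, v) =
              (segs ++ [segA line (irange s (m + 1))], []) := by
            have hne : irange s (m + 1) ≠ [] := by
              have hlen : (irange s (m + 1)).length = m + 1 := by simp [irange]
              intro hcon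
              rw [hcon] at hlen
              simp at hlen
            simp [stepA, hv, hne]
          rw [estep, (ih t' ht').1 (j + 1) _, segA_irange]
          have hr : runLen color (v :: t') = 0 := by simp [runLen, hv]
          rw [hr]
          have e1 : m + 0 = m := by omega
          have e2 : j + ((0 : Nat) : Int) + 1 = j + 1 := by push_cast; ring
          rw [e1, e2, List.drop_succ_cons, List.drop_zero]
          simp

-- ===== VERDICT (by name: the statement is the Claim_ definition above) =====
theorem extract_segments_spec : Claim_equal_extract_segments := by
  intro line color _
  unfold Spec_extract_segments extract_segments extract_segments_alt
  simpa using (mainInv line color line.length line (le_refl _)).1 0 []
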